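-- pv_equiv track=rewrite | github.com/corradomio/python_projects | commons/stdlib/dictx.py | dict_exclude
-- ===== SOURCE A (Python) =====
-- def dict_exclude(d:dict, keys:list[str]) -> dict:
--     """
--     Create a dict excluding the keys in the list
--     """
--     if isinstance(keys, str):
--         keys = [keys]
--
--     s = {}
--     for k in d:
--         if k not in keys:
--             s[k] = d[k]
--     return s
-- ===== SOURCE B (Python) =====
-- def dict_exclude(d: dict, keys: list[str]) -> dict:
--     """
--     Create a dict excluding the keys in the list
--     """
--     if isinstance(keys, str):
--         keys = [keys]
--
--     result = dict(d)
--     for k in keys: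
--         if k in result:
--             del result[k]
--     return result
-- ===== Notes on version B (the rewrite author's own statement) =====
-- stated objective: faster
-- what changed: Instead of scanning d and testing each of its keys against the exclusion list, B copies d once and iterates over the exclusion list deleting each key from the copy, replacing the per-entry O(m) list-membership scan with O(1) hash deletions.
import Mathlib
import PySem

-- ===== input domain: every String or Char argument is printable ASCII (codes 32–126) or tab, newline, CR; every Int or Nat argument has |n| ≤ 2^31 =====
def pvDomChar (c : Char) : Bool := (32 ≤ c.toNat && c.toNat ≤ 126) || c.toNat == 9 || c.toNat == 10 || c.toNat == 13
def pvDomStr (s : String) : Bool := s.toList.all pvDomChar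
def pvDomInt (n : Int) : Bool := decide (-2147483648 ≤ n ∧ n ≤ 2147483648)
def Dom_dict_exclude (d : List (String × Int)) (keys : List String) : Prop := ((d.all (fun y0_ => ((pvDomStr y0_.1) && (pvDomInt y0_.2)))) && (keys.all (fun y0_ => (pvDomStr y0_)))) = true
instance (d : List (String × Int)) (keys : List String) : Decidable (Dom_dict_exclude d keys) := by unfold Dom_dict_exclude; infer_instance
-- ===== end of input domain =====

-- B copies d once and deletes each excluded key from the copy (checked `del`), instead of
-- scanning d and list-testing every key; same result, O(n+m) instead of O(n*m).

-- ===== PORT A =====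
-- Python A: build an empty dict s; for each key k of d (in insertion order), if k is not in
-- the exclusion list, set s[k] = d[k].  (The isinstance(keys, str) guard cannot fire under
-- the declared list[str] type and has no Lean counterpart.)
def dict_exclude (d : List (String × Int)) (keys : List String) : List (String × Int) :=
  (d.foldl (fun s kv => if keys.contains kv.1 then s else s.insert kv.1 kv.2)
    (PySem.Dict.empty : PySem.Dict String Int)).items

-- ===== PORT B =====
-- Python B: result = dict(d); for k in keys: if k in result: del result[k]; return result.
-- The deletion loop is transcribed as the recursive helper pvPopAll (one call per key).
def pvPopAll : List String → PySem.Dict String Int → PySem.Dict String Int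
  | [], r => r
  | k :: ks, r => pvPopAll ks (if r.contains k then r.erase k else r)

def dict_exclude_alt (d : List (String × Int)) (keys : List String) : List (String × Int) :=
  (pvPopAll keys (PySem.Dict.ofList d)).items

-- ===== PRECONDITION & SPEC =====
def Spec_dict_exclude (d : List (String × Int)) (keys : List String) (out : List (String × Int)) : Prop := out = dict_exclude_alt d keys
instance (d : List (String × Int)) (keys : List String) (out : List (String × Int)) : Decidable (Spec_dict_exclude d keys out) := by unfold Spec_dict_exclude; infer_instance

-- ===== CLAIM (what is proved, stated in full; the proofs are below) =====
def Claim_equal_dict_exclude : Prop := ∀ (d : List (String × Int)) (keys : List String), Dom_dict_exclude d keys → Spec_dict_exclude d keys (dict_exclude d keys)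

-- ===== LEMMAS AND PROOFS =====

-- One checked deletion is the filter by ≠ k (when k is absent the filter keeps everything).
theorem pv_pop_step (k : String) (r : PySem.Dict String Int) :
    (if r.contains k then r.erase k else r)
      = PySem.Dict.mk (r.items.filter (fun p => !(p.1 == k))) := by
  by_cases h : r.contains k = true
  · rw [if_pos h]; rfl
  · rw [if_neg h]
    apply PySem.Dict.ext
    show r.items = r.items.filter _
    symm
    apply List.filter_eq_self.2
    intro p hp
    have hany : r.items.any (fun p => p.1 == k) = false := by
      have : r.contains k = r.items.any (fun p => p.1 == k) := rfl
      rw [this] at h; exact Bool.eq_false_iff.2 h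
    have := List.any_eq_false.1 hany p hp
    simpa using this

-- The whole deletion loop filters the items by non-membership of the key.
theorem pv_popAll (ks : List String) (r : PySem.Dict String Int) :
    pvPopAll ks r = PySem.Dict.mk (r.items.filter (fun p => !(ks.contains p.1))) := by
  induction ks generalizing r with
  | nil => simp [pvPopAll]
  | cons k ks ih =>
      show pvPopAll ks (if r.contains k then r.erase k else r) = _
      rw [pv_pop_step, ih]
      have : (PySem.Dict.mk (r.items.filter (fun p => !(p.1 == k)))).items
          = r.items.filter (fun p => !(p.1 == k)) := rfl
      rw [this, List.filter_filter]
      congr 1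
      apply List.filter_congr
      intro p _
      by_cases h : p.1 = k <;> simp [h, Bool.and_comm]

-- One step of A's loop, seen through the filter characterisation.
theorem pv_step (keys : List String) (s : PySem.Dict String Int) (k : String) (v : Int) :
    (if keys.contains k
      then PySem.Dict.mk (s.items.filter (fun p => !(keys.contains p.1)))
      else (PySem.Dict.mk (s.items.filter (fun p => !(keys.contains p.1)))).insert k v)
    = PySem.Dict.mk ((s.insert k v).items.filter (fun p => !(keys.contains p.1))) := by
  have hcont : ∀ (t : PySem.Dict String Int) (x : String),
      t.contains x = t.items.any (fun p => p.1 == x) := fun _ _ => rfl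
  have hmapfilter : (s.items.map (fun p => if p.1 == k then (k, v) else p)).filter
        (fun p => !(keys.contains p.1))
      = (s.items.filter (fun p => !(keys.contains p.1))).map
        (fun p => if p.1 == k then (k, v) else p) := by
    rw [List.filter_map]
    congr 1
    apply List.filter_congr
    intro p _
    by_cases h : p.1 = k
    · simp [h]
    · simp [h]
  by_cases hk : keys.contains k = true
  · -- k is excluded: inserting it changes nothing after filtering
    rw [if_pos hk]
    apply PySem.Dict.ext
    show s.items.filter _ = ((s.insert k v).items.filter _)
    rw [PySem.Dict.items_insert]
    by_cases hs : s.contains k = true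
    · rw [if_pos hs, hmapfilter]
      have hid : ∀ p ∈ s.items.filter (fun p => !(keys.contains p.1)),
          (if p.1 == k then ((k, v) : String × Int) else p) = p := by
        intro p hp
        have hq := List.of_mem_filter hp
        have hne : ¬ (p.1 = k) := by
          intro he; rw [he, hk] at hq; simp at hq
        simp [hne]
      calc s.items.filter (fun p => !(keys.contains p.1))
          = (s.items.filter (fun p => !(keys.contains p.1))).map id := (List.map_id _).symm
        _ = _ := (List.map_congr_left (by intro p hp; exact (hid p hp).symm))
    · rw [if_neg hs, List.filter_append]
      have hkv : List.filter (fun p => !(keys.contains p.1)) [((k : String), (v : Int))] = [] := by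
        simp only [List.filter_cons, List.filter_nil, hk]
        simp
      rw [hkv, List.append_nil]
  · -- k is kept: both sides insert it
    rw [if_neg hk]
    apply PySem.Dict.ext
    by_cases hs : s.contains k = true
    · -- k already present: it survives the filter, so both sides overwrite in place
      have hc : (PySem.Dict.mk (s.items.filter (fun p => !(keys.contains p.1)))).contains k = true := by
        rw [hcont]
        show (s.items.filter _).any _ = true
        rw [hcont] at hs
        obtain ⟨p, hp, hpk⟩ := List.any_eq_true.1 hs
        refine List.any_eq_true.2 ⟨p, List.mem_filter.2 ⟨hp, ?_⟩, hpk⟩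
        have hpe : p.1 = k := by simpa using hpk
        rw [hpe, Bool.not_eq_true']
        exact Bool.eq_false_iff.2 hk
      show ((PySem.Dict.mk (s.items.filter (fun p => !(keys.contains p.1)))).insert k v).items
          = (s.insert k v).items.filter (fun p => !(keys.contains p.1))
      rw [PySem.Dict.items_insert, PySem.Dict.items_insert, hc, hs]
      simp only [if_true]
      exact hmapfilter.symm
    · -- k fresh in s, hence fresh in the filtered dict: both sides append
      have hc : (PySem.Dict.mk (s.items.filter (fun p => !(keys.contains p.1)))).contains k = false := by
        rw [hcont]
        show (s.items.filter _).any _ = false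
        rw [Bool.eq_false_iff]
        intro hany
        obtain ⟨p, hp, hpk⟩ := List.any_eq_true.1 hany
        exact hs (by rw [hcont]; exact List.any_eq_true.2 ⟨p, List.mem_of_mem_filter hp, hpk⟩)
      have hs' : s.contains k = false := Bool.eq_false_iff.2 hs
      show ((PySem.Dict.mk (s.items.filter (fun p => !(keys.contains p.1)))).insert k v).items
          = (s.insert k v).items.filter (fun p => !(keys.contains p.1))
      rw [PySem.Dict.items_insert, PySem.Dict.items_insert, hc, hs']
      simp only [Bool.false_eq_true, if_false]
      rw [List.filter_append]
      have hkv : List.filter (fun p => !(keys.contains p.1)) [((k : String), (v : Int))]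
          = [((k : String), (v : Int))] := by
        simp only [List.filter_cons, List.filter_nil, Bool.eq_false_iff.2 hk]
        simp
      rw [hkv]

-- A's whole loop maintains the filter invariant against the plain dict-building loop.
theorem pv_loop (keys : List String) (l : List (String × Int)) (s : PySem.Dict String Int) :
    l.foldl (fun s kv => if keys.contains kv.1 then s else s.insert kv.1 kv.2)
      (PySem.Dict.mk (s.items.filter (fun p => !(keys.contains p.1))))
    = PySem.Dict.mk ((l.foldl (fun s kv => s.insert kv.1 kv.2) s).items.filter
        (fun p => !(keys.contains p.1))) := by
  induction l generalizing s with
  | nil => rfl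
  | cons kv l ih =>
      show l.foldl _ (if keys.contains kv.1 then _ else _) = _
      rw [pv_step keys s kv.1 kv.2]
      exact ih (s.insert kv.1 kv.2)

-- ===== VERDICT (by name: the statement is the Claim_ definition above) =====
theorem dict_exclude_spec : Claim_equal_dict_exclude := by
  intro d keys _
  show dict_exclude d keys = dict_exclude_alt d keys
  unfold dict_exclude dict_exclude_alt
  rw [pv_popAll]
  have hempty : (PySem.Dict.empty : PySem.Dict String Int)
      = PySem.Dict.mk ((PySem.Dict.empty : PySem.Dict String Int).items.filter
          (fun p => !(keys.contains p.1))) := rfl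
  rw [hempty, pv_loop]
  rfl
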